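-- pv_equiv track=rewrite | github.com/Brian-ED/Fire-Owl-bot | code/functions.py | commandHandler
-- ===== SOURCE A (Python) =====
-- def commandHandler(prefix:str,cmd:str,commands:list[str])->str:
--     if cmd == prefix:
--         cmd+='help'
--     validityTable=[i.startswith(cmd[len(prefix):].lower()) for i in commands]
--     if 1==sum(validityTable):
--         return commands[validityTable.index(1)]
--     else:
--         return ''
-- ===== SOURCE B (Python) =====
-- def commandHandler(prefix: str, cmd: str, commands: list[str]) -> str:
--     if cmd == prefix:
--         cmd += 'help'
--     target = cmd[len(prefix):].lower()
--     for i, c in enumerate(commands):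
--         if c.startswith(target):
--             # c is the first match; it is the answer iff no later command also matches
--             if any(x.startswith(target) for x in commands[i+1:]):
--                 return ''
--             return c
--     return ''
-- ===== Notes on version B (the rewrite author's own statement) =====
-- stated objective: faster
-- what changed: Instead of A's count-all-matches-then-index strategy (build a boolean table over all commands, sum it, .index(1)), B searches for the FIRST matching command and then only checks the remaining tail for a SECOND match, returning early as soon as ambiguity is detected: no intermediate table, no counting, no re-indexing pass.
import Mathlib
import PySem

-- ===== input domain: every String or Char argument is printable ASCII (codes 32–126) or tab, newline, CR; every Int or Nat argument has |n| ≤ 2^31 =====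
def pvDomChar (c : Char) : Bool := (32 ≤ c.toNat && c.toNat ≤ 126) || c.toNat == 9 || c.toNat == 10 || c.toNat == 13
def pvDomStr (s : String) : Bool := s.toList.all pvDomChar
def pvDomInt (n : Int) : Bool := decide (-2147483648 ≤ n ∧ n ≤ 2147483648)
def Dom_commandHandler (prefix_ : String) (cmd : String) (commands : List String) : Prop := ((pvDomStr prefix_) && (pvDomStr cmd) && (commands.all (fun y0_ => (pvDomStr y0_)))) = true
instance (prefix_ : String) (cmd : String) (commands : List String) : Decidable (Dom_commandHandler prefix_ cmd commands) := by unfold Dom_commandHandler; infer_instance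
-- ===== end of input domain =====

-- B replaces A's count-all-then-index strategy by a first-match search that then only checks the tail for a second match, exiting early; objective: faster (constant-factor, measured).

-- ===== PORT A =====
def commandHandler (prefix_ : String) (cmd : String) (commands : List String) : String :=
  let cmd := if cmd == prefix_ then cmd ++ "help" else cmd
  let validityTable := commands.map (fun i =>
    PySem.Str.startswith i (PySem.Str.lower (PySem.Str.slice cmd (some (PySem.Str.len prefix_)) none)))
  if (1 : Int) == validityTable.foldl (fun acc b => acc + (if b then 1 else 0)) 0 then
    match PySem.List.index? validityTable true with
    | some j => (PySem.List.pyGet? commands (j : Int)).getD ""  -- index is in range: sum = 1 guards it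
    | none => ""
  else ""

-- ===== PORT B =====
-- Source B's loop with early returns, as structural recursion; 'commands[i+1:]' is the recursion's tail
def commandHandler_altLoop (target : String) : List String → String
  | [] => ""
  | c :: rest =>
    if PySem.Str.startswith c target then
      if rest.any (fun x => PySem.Str.startswith x target) then "" else c
    else commandHandler_altLoop target rest

def commandHandler_alt (prefix_ : String) (cmd : String) (commands : List String) : String :=
  let cmd := if cmd == prefix_ then cmd ++ "help" else cmd
  let target := PySem.Str.lower (PySem.Str.slice cmd (some (PySem.Str.len prefix_)) none)
  commandHandler_altLoop target commands

-- ===== PRECONDITION & SPEC =====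
def Spec_commandHandler (prefix_ : String) (cmd : String) (commands : List String) (out : String) : Prop := out = commandHandler_alt prefix_ cmd commands
instance (prefix_ : String) (cmd : String) (commands : List String) (out : String) : Decidable (Spec_commandHandler prefix_ cmd commands out) := by unfold Spec_commandHandler; infer_instance

-- ===== CLAIM (what is proved, stated in full; the proofs are below) =====
def Claim_equal_commandHandler : Prop := ∀ (prefix_ : String) (cmd : String) (commands : List String), Dom_commandHandler prefix_ cmd commands → Spec_commandHandler prefix_ cmd commands (commandHandler prefix_ cmd commands)

-- ===== LEMMAS AND PROOFS =====

theorem pv_sum_eq_count (l : List Bool) (a : Int) :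
    l.foldl (fun acc b => acc + (if b then 1 else 0)) a = a + l.count true := by
  induction l generalizing a with
  | nil => simp
  | cons x xs ih =>
    cases x <;> simp [List.foldl_cons, ih, List.count_cons] <;> ring

theorem pv_index_pick (f : String → Bool) (l : List String) :
    (match PySem.List.index? (l.map f) true with
     | some j => (PySem.List.pyGet? l (j : Int)).getD ""
     | none => "") = (l.find? f).getD "" := by
  induction l with
  | nil => simp [PySem.List.index?]
  | cons x xs ih =>
    by_cases hx : f x
    · rw [List.map_cons, hx, PySem.List.index?_cons_self]
      simp [List.find?_cons, hx, PySem.List.pyGet?, PySem.List.pyIdx?]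
    · rw [List.map_cons, PySem.List.index?_cons_of_ne (x := f x) (v := true) (List.map f xs) (by simp [hx]),
        List.find?_cons_of_neg (by simp [hx])]
      cases h : PySem.List.index? (xs.map f) true with
      | none => rw [h] at ih; simpa using ih
      | some j =>
        rw [h] at ih
        simp only [Option.map_some]
        have hg : PySem.List.pyGet? (x :: xs) ((j + 1 : Nat) : Int) = PySem.List.pyGet? xs (j : Int) := by
          rw [PySem.List.pyGet?_natCast, PySem.List.pyGet?_natCast]
          simp
        simpa [hg] using ih

-- B's loop computes: the first match if the match count is exactly 1, else ""
theorem pv_altLoop_char (t : String) (l : List String) :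
    commandHandler_altLoop t l
      = (if l.countP (fun x => PySem.Str.startswith x t) = 1
         then (l.find? (fun x => PySem.Str.startswith x t)).getD "" else "") := by
  induction l with
  | nil => rfl
  | cons c rest ih =>
    rw [commandHandler_altLoop]
    simp only [List.countP_cons, List.find?_cons, List.any_eq_true, ih]
    by_cases hc : PySem.Str.startswith c t = true
    · rw [if_pos hc, hc]
      by_cases hr : ∃ x ∈ rest, PySem.Str.startswith x t = true
      · have hpos : rest.countP (fun x => PySem.Str.startswith x t) ≠ 0 := by
          rw [ne_eq, List.countP_eq_zero]
          intro h
          obtain ⟨x, hx, hfx⟩ := hr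
          exact h x hx hfx
        rw [if_pos hr, if_pos rfl, if_neg (by omega)]
      · have h0 : rest.countP (fun x => PySem.Str.startswith x t) = 0 := by
          rw [List.countP_eq_zero]
          intro x hx hfx
          exact hr ⟨x, hx, hfx⟩
        rw [if_neg hr, if_pos rfl, if_pos (by omega)]
        rfl
    · have hc' : PySem.Str.startswith c t = false := by simpa using hc
      rw [if_neg hc, hc']
      simp only [if_false, Bool.false_eq_true, Nat.add_zero]

theorem pv_main (t : String) (l : List String) :
    (let validityTable := l.map (fun i => PySem.Str.startswith i t)
     if (1 : Int) == validityTable.foldl (fun acc b => acc + (if b then 1 else 0)) 0 then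
       match PySem.List.index? validityTable true with
       | some j => (PySem.List.pyGet? l (j : Int)).getD ""
       | none => ""
     else "")
    = commandHandler_altLoop t l := by
  show (if (1 : Int) == (l.map (fun i => PySem.Str.startswith i t)).foldl
          (fun acc b => acc + (if b then 1 else 0)) 0 then
       match PySem.List.index? (l.map (fun i => PySem.Str.startswith i t)) true with
       | some j => (PySem.List.pyGet? l (j : Int)).getD ""
       | none => ""
     else "") = commandHandler_altLoop t l
  rw [pv_sum_eq_count, pv_index_pick (fun i => PySem.Str.startswith i t) l,
    pv_altLoop_char t l]
  have hcount : (l.map (fun i => PySem.Str.startswith i t)).count true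
      = l.countP (fun x => PySem.Str.startswith x t) := by
    rw [List.count_eq_countP, List.countP_map]
    congr 1
    funext x
    simp
  by_cases h1 : l.countP (fun x => PySem.Str.startswith x t) = 1
  · rw [if_pos h1, if_pos (show _ = true by rw [hcount, h1]; rfl)]
  · have hA : ¬ ((1 : Int) == 0 + ((l.map (fun i => PySem.Str.startswith i t)).count true : Int)) = true := by
      rw [hcount]
      simp only [beq_iff_eq, zero_add]
      intro h
      exact h1 (by exact_mod_cast h.symm)
    rw [if_neg hA, if_neg h1]

-- ===== VERDICT (by name: the statement is the Claim_ definition above) =====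
theorem commandHandler_spec : Claim_equal_commandHandler := by
  intro prefix_ cmd commands _
  unfold Spec_commandHandler commandHandler commandHandler_alt
  exact pv_main (PySem.Str.lower (PySem.Str.slice (if cmd == prefix_ then cmd ++ "help" else cmd)
    (some (PySem.Str.len prefix_)) none)) commands
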